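-- pv_equiv track=rewrite | github.com/RoccoTescaro/university | artificial_intelligence/project/main.py | validate_bnf
-- ===== SOURCE A (Python) =====
-- operators = {
--     "!": lambda left: Node("!", left=left),
--     "&": lambda left, right: Node("&", left=left, right=right),
--     "|": lambda left, right: Node("|", left=left, right=right),
--     "=>": lambda left, right: Node("=>", left=left, right=right),
--     "<=>": lambda left, right: Node("<=>", left=left, right=right)
-- }
--
-- def validate_bnf(tokens):
--     if len(tokens) == 1 and tokens[0] not in operators:
--         return True
--
--     expected_variable = True
--     parentesis_index_stack = []
--     for i, token in enumerate(tokens):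
--         if token == '(':
--             #expected_variable = False
--             parentesis_index_stack.append(i)
--         elif token == ')':
--             if len(parentesis_index_stack) == 0:
--                 return False
--             start_index = parentesis_index_stack.pop()
--             if not validate_bnf(tokens[start_index+1:i]):
--                 return False
--         else:
--             if token == "!":
--                 continue
--             if (expected_variable and token in operators) or (not expected_variable and token not in operators):
--                 return False
--             else:
--                 expected_variable = not expected_variable
--
--     if tokens[-1] in operators:
--         return False
--
--     if len(parentesis_index_stack) != 0:
--         return False
--
--     return True
-- ===== SOURCE B (Python) =====
-- operators = ("!", "&", "|", "=>", "<=>")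
--
--
-- def validate_bnf(tokens):
--     # single linear pass: a depth counter and the previous token replace
--     # A's index stack and its recursive re-validation of every group
--     if len(tokens) == 1 and tokens[0] not in operators:
--         return True
--     expected_variable = True
--     depth = 0
--     prev = None
--     for token in tokens:
--         if token == '(':
--             if not expected_variable:
--                 return False
--             depth += 1
--         elif token == ')':
--             if depth == 0 or prev in operators:
--                 return False
--             depth -= 1
--         elif token != '!':
--             if expected_variable == (token in operators):
--                 return False
--             expected_variable = not expected_variable
--         prev = token
--     if tokens[-1] in operators or depth != 0:
--         return False
--     return True
-- ===== Notes on version B (the rewrite author's own statement) =====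
-- stated objective: alternative
-- what changed: A re-validates every parenthesised group recursively from scratch when its closing parenthesis is reached; B instead makes a single left-to-right pass tracking only the nesting depth, the expected-token flag and the previous token (no recursion, no index stack, no slicing).
-- outside the precondition, e.g. on validate_bnf([')', '(', ')']): A returns False, B returns False; on validate_bnf(['(', ')']): A raises IndexError, B returns True
import Mathlib
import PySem

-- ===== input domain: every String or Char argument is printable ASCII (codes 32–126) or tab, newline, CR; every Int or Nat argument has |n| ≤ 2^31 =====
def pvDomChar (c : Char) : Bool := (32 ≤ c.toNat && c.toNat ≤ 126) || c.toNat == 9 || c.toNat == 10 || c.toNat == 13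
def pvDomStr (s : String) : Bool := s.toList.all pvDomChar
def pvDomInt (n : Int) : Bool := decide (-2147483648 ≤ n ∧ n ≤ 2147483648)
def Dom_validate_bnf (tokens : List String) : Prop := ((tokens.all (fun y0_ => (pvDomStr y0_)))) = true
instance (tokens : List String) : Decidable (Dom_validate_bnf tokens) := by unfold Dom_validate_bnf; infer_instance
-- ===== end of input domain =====

-- B replaces A's recursive re-validation of every parenthesised group (A re-validates each
-- group's slice from scratch at its closing parenthesis) by a single left-to-right pass that
-- tracks only the nesting depth, the expected-token flag and the previous token.

-- ===== PORT A =====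
def vbOps : List String := ["!", "&", "|", "=>", "<=>"]

-- length bound cited by the termination proof of the mutual recursion below
theorem vbSliceLen (tokens : List String) (s i : Nat) (hi : i < tokens.length) :
    (PySem.List.slice tokens (some ((s : Int) + 1)) (some (i : Int))).length < tokens.length := by
  have h1 : ((s : Int) + 1) = (((s + 1 : Nat) : Int)) := by push_cast; ring
  rw [h1, PySem.List.slice_natCast]
  have h2 : (tokens.drop (s + 1)).length = tokens.length - (s + 1) := List.length_drop ..
  have := List.length_take_le (i - (s + 1)) (tokens.drop (s + 1))
  omega

mutual
def validate_bnf (tokens : List String) : Bool :=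
  if tokens.length == 1 && !(vbOps.contains (tokens.headD "")) then true
  else vbLoop tokens 0 true []
  termination_by (tokens.length, tokens.length + 1)

def vbLoop (tokens : List String) (i : Nat) (expected : Bool) (stack : List Nat) : Bool :=
  if h : i < tokens.length then
    if tokens[i] = "(" then vbLoop tokens (i + 1) expected (i :: stack)
    else if tokens[i] = ")" then
      match stack with
      | [] => false
      | s :: rest =>
        if validate_bnf (PySem.List.slice tokens (some ((s : Int) + 1)) (some (i : Int))) then
          vbLoop tokens (i + 1) expected rest
        else false
    else if tokens[i] = "!" then vbLoop tokens (i + 1) expected stack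
    else if (expected && vbOps.contains tokens[i]) || (!expected && !(vbOps.contains tokens[i])) then false
    else vbLoop tokens (i + 1) (!expected) stack
  else
    if vbOps.contains ((PySem.List.pyGet? tokens (-1)).getD "") then false
    else if stack.length ≠ 0 then false
    else true
  termination_by (tokens.length, tokens.length - i)
  decreasing_by
  · exact Prod.Lex.right _ (by omega)
  · exact Prod.Lex.left _ _ (vbSliceLen tokens s i h)
  · exact Prod.Lex.right _ (by omega)
  · exact Prod.Lex.right _ (by omega)
  · exact Prod.Lex.right _ (by omega)
end

-- ===== PORT B =====
def vbPrevOp : Option String → Bool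
  | none => false
  | some p => vbOps.contains p

def vbAltStep (st : Bool × Nat × Option String) (token : String) : Option (Bool × Nat × Option String) :=
  if token = "(" then
    if !st.1 then none else some (st.1, st.2.1 + 1, some token)
  else if token = ")" then
    if st.2.1 = 0 || vbPrevOp st.2.2 then none else some (st.1, st.2.1 - 1, some token)
  else if token ≠ "!" then
    if st.1 == vbOps.contains token then none
    else some (!st.1, st.2.1, some token)
  else some (st.1, st.2.1, some token)

def vbAltLoop : List String → Bool × Nat × Option String → Option (Bool × Nat × Option String)
  | [], st => some st
  | t :: ts, st =>
    match vbAltStep st t with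
    | none => none
    | some st' => vbAltLoop ts st'

def validate_bnf_alt (tokens : List String) : Bool :=
  if tokens.length == 1 && !(vbOps.contains (tokens.headD "")) then true
  else
    match vbAltLoop tokens (true, 0, none) with
    | none => false
    | some (_, depth, _) =>
      if vbOps.contains ((PySem.List.pyGet? tokens (-1)).getD "") || depth ≠ 0 then false else true

-- ===== PRECONDITION & SPEC =====
def vbNoAdj : List String → Bool
  | [] => true
  | [_] => true
  | a :: b :: r => !(a = "(" && b = ")") && vbNoAdj (b :: r)

-- Pre_ excludes the empty list and any token list containing '(' immediately followed by ')':
-- whenever A's scan reaches such an adjacent pair it calls itself on the empty slice and raises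
-- IndexError; on some of these inputs A returns False before reaching the pair (see cites).
def Pre_validate_bnf (tokens : List String) : Prop := tokens ≠ [] ∧ vbNoAdj tokens = true
instance (tokens : List String) : Decidable (Pre_validate_bnf tokens) := by
  unfold Pre_validate_bnf; infer_instance

def pvWitness_validate_bnf : List String := ["(", "a", "&", "b", ")", "|", "c"]

def Spec_validate_bnf (tokens : List String) (out : Bool) : Prop := out = validate_bnf_alt tokens
instance (tokens : List String) (out : Bool) : Decidable (Spec_validate_bnf tokens out) := by
  unfold Spec_validate_bnf; infer_instance

-- ===== CLAIM (what is proved, stated in full; the proofs are below) =====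
def Claim_equal_validate_bnf : Prop := ∀ (tokens : List String), Dom_validate_bnf tokens → Pre_validate_bnf tokens → Spec_validate_bnf tokens (validate_bnf tokens)

-- ===== LEMMAS AND PROOFS =====

-- abbreviations for the proofs
def vbSt0 : Bool × Nat × Option String := (true, 0, none)

def vbSeg (tokens : List String) (a b : Nat) : List String := (tokens.drop a).take (b - a)

def vbPrevSeg (tokens : List String) (a i : Nat) : Option String :=
  if i ≤ a then none else some (tokens.getD (i - 1) "")

-- paren-depth run (none = a ')' below depth 0)
def vbRd : List String → Nat → Option Nat
  | [], d => some d
  | t :: ts, d =>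
    if t = "(" then vbRd ts (d + 1)
    else if t = ")" then (if d = 0 then none else vbRd ts (d - 1))
    else vbRd ts d

def vbPbang (u : List String) : Bool := u.all (fun t => t = "(" || t = ")" || t = "!")

def vbNoAdjP (l : List String) : Prop :=
  ∀ j : Nat, ¬(l[j]? = some "(" ∧ l[j + 1]? = some ")")

def vbStackOK (tokens : List String) (i : Nat) (stack : List Nat) : Prop :=
  (∀ k s, stack[k]? = some s →
      s < i ∧ tokens[s]? = some "(" ∧ vbRd (vbSeg tokens (s + 1) i) 0 = some k) ∧
    List.IsChain (· > ·) stack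

def vbLiveOK (tokens : List String) (i : Nat) (e : Bool) (stack : List Nat) : Prop :=
  ∀ k s, stack[k]? = some s →
    vbAltLoop (vbSeg tokens (s + 1) i) vbSt0 = some (e, k, vbPrevSeg tokens (s + 1) i)

def vbWitness (tokens : List String) (i : Nat) (e : Bool) (s : Nat) : Prop :=
  vbAltLoop (vbSeg tokens (s + 1) i) vbSt0 = none ∨
    (e = false ∧ vbPbang (vbSeg tokens (s + 1) i) = true ∧
      ∃ d p, vbAltLoop (vbSeg tokens (s + 1) i) vbSt0 = some (true, d, p))

def vbFinish (tokens : List String) : Option (Bool × Nat × Option String) → Bool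
  | none => false
  | some (_, d, _) =>
    if vbOps.contains ((PySem.List.pyGet? tokens (-1)).getD "") || d ≠ 0 then false else true

-- ---- small structural lemmas ----

theorem vbAltLoop_append (u v : List String) (st : Bool × Nat × Option String) :
    vbAltLoop (u ++ v) st =
      match vbAltLoop u st with
      | none => none
      | some st' => vbAltLoop v st' := by
  induction u generalizing st with
  | nil => simp [vbAltLoop]
  | cons t ts ih =>
    simp only [List.cons_append, vbAltLoop]
    cases vbAltStep st t with
    | none => rfl
    | some st' => exact ih st'

theorem vbRd_append (u v : List String) (d : Nat) :
    vbRd (u ++ v) d =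
      match vbRd u d with
      | none => none
      | some d' => vbRd v d' := by
  induction u generalizing d with
  | nil => simp [vbRd]
  | cons t ts ih =>
    simp only [List.cons_append, vbRd]
    split
    · exact ih _
    · rename_i h1
      by_cases h2 : t = ")"
      · rw [if_pos h2, if_pos h2]
        by_cases h3 : d = 0
        · rw [if_pos h3]; rw [if_pos h3]
        · rw [if_neg h3, if_neg h3]; exact ih _
      · rw [if_neg h2, if_neg h2]; exact ih _

theorem vbSeg_self (tokens : List String) (a : Nat) : vbSeg tokens a a = [] := by
  simp [vbSeg]

theorem vbSeg_snoc (tokens : List String) (a b : Nat) (hab : a ≤ b) (hb : b < tokens.length) :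
    vbSeg tokens a (b + 1) = vbSeg tokens a b ++ [tokens[b]] := by
  unfold vbSeg
  have h1 : b + 1 - a = (b - a) + 1 := by omega
  rw [h1, List.take_add_one]
  have h2 : (tokens.drop a)[b - a]? = tokens[a + (b - a)]? := List.getElem?_drop
  have h3 : a + (b - a) = b := by omega
  rw [h2, h3, List.getElem?_eq_getElem hb]
  rfl

theorem vbSeg_length_le (tokens : List String) (a b : Nat) :
    (vbSeg tokens a b).length ≤ tokens.length - a := by
  unfold vbSeg
  have h2 : (tokens.drop a).length = tokens.length - a := List.length_drop ..
  have h3 : (List.take (b - a) (List.drop a tokens)).length = min (b - a) (List.drop a tokens).length := List.length_take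
  omega

theorem vbSeg_length (tokens : List String) (a b : Nat) (hab : a ≤ b) (hb : b ≤ tokens.length) :
    (vbSeg tokens a b).length = b - a := by
  unfold vbSeg
  rw [List.length_take, List.length_drop]
  omega

theorem vbSeg_getElem? (tokens : List String) (a b j : Nat) (hj : j < b - a) :
    (vbSeg tokens a b)[j]? = tokens[a + j]? := by
  unfold vbSeg
  rw [List.getElem?_take_of_lt hj, List.getElem?_drop]

theorem vbNoAdjP_seg (tokens : List String) (a b : Nat) (h : vbNoAdjP tokens) :
    vbNoAdjP (vbSeg tokens a b) := by
  intro j ⟨h1, h2⟩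
  have hj1 : j < (vbSeg tokens a b).length := by
    by_contra hc
    rw [List.getElem?_eq_none_iff.mpr (by omega)] at h1
    simp at h1
  have hj2 : j + 1 < (vbSeg tokens a b).length := by
    by_contra hc
    rw [List.getElem?_eq_none_iff.mpr (by omega)] at h2
    simp at h2
  have hlen : (vbSeg tokens a b).length ≤ b - a := by
    unfold vbSeg; exact List.length_take_le _ _
  rw [vbSeg_getElem? tokens a b j (by omega)] at h1
  rw [vbSeg_getElem? tokens a b (j + 1) (by omega)] at h2
  refine h (a + j) ⟨h1, ?_⟩
  rw [show a + j + 1 = a + (j + 1) by omega]; exact h2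

theorem vbNoAdj_iff (l : List String) : vbNoAdj l = true ↔ vbNoAdjP l := by
  induction l with
  | nil => simp [vbNoAdj, vbNoAdjP]
  | cons a r ih =>
    cases r with
    | nil =>
      simp only [vbNoAdj, vbNoAdjP, true_iff]
      intro j ⟨h1, h2⟩
      cases j with
      | zero => simp at h2
      | succ j => simp at h1
    | cons b r' =>
      simp only [vbNoAdj, Bool.and_eq_true, Bool.not_eq_true', Bool.and_eq_false_iff,
        decide_eq_false_iff_not, ih, vbNoAdjP]
      constructor
      · rintro ⟨hab, hR⟩ j ⟨h1, h2⟩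
        cases j with
        | zero =>
          simp only [List.getElem?_cons_zero, Option.some.injEq] at h1
          simp only [List.getElem?_cons_succ, List.getElem?_cons_zero, Option.some.injEq] at h2
          rcases hab with h | h
          · exact h h1
          · exact h h2
        | succ j =>
          simp only [List.getElem?_cons_succ] at h1 h2
          exact hR j ⟨h1, h2⟩
      · intro h
        refine ⟨?_, fun j ⟨h1, h2⟩ => h (j + 1) ⟨by simpa using h1, by simpa using h2⟩⟩
        by_cases ha : a = "("
        · by_cases hb : b = ")"
          · exact absurd ⟨by simp [ha], by simp [hb]⟩ (h 0)
          · exact Or.inr hb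
        · exact Or.inl ha

theorem vbOps_ne_paren {x : String} (h : vbOps.contains x = true) : x ≠ "(" ∧ x ≠ ")" := by
  constructor <;> rintro rfl <;> simp [vbOps] at h

-- the singleton behaviour of B is uniform: True exactly on non-operators
theorem vbAlt_single (x : String) : validate_bnf_alt [x] = !vbOps.contains x := by
  by_cases hx : vbOps.contains x = true
  · obtain ⟨h1, h2⟩ := vbOps_ne_paren hx
    have hx'' : x ∈ vbOps := by simpa using hx
    by_cases hb : x = "!"
    · subst hb
      simp [validate_bnf_alt, vbAltLoop, vbAltStep, PySem.List.pyGet?_neg_one, vbOps]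
    · simp [validate_bnf_alt, vbAltLoop, vbAltStep, h1, h2, hb, hx'']
  · have hx' : vbOps.contains x = false := by simpa using hx
    have hg : (([x] : List String).length == 1 && !(vbOps.contains (([x] : List String).headD ""))) = true := by
      simp [List.headD]; simpa using hx
    rw [validate_bnf_alt, if_pos hg, hx']
    rfl

theorem vbA_single (x : String) : validate_bnf [x] = !vbOps.contains x := by
  by_cases hx : vbOps.contains x = true
  · obtain ⟨h1, h2⟩ := vbOps_ne_paren hx
    have hx'' : x ∈ vbOps := by simpa using hx
    rw [validate_bnf]
    simp only [List.length_singleton, List.headD, hx, Bool.not_true, Bool.and_false,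
      Bool.false_eq_true, if_false, beq_self_eq_true, Bool.true_and]
    rw [vbLoop]
    simp only [List.length_singleton, Nat.zero_lt_one, dif_pos, List.getElem_cons_zero]
    rw [if_neg h1, if_neg h2]
    by_cases hb : x = "!"
    · rw [if_pos hb, vbLoop]
      simp [PySem.List.pyGet?_neg_one, hx'']
    · rw [if_neg hb, if_pos (by simp [hx''])]
      try simp [hx]
  · have hx' : vbOps.contains x = false := by simpa using hx
    have hg : (([x] : List String).length == 1 && !(vbOps.contains (([x] : List String).headD ""))) = true := by
      simp [List.headD]; simpa using hx
    rw [validate_bnf, if_pos hg, hx']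
    rfl

-- when the length is not 1, B is its loop followed by the final checks
theorem vbAlt_else (tokens : List String) (h : tokens.length ≠ 1) :
    validate_bnf_alt tokens = vbFinish tokens (vbAltLoop tokens vbSt0) := by
  have hg : ¬((tokens.length == 1 && !(vbOps.contains (tokens.headD ""))) = true) := by
    simp [h]
  rw [validate_bnf_alt, if_neg hg]
  show _ = vbFinish tokens (vbAltLoop tokens (true, 0, none))
  cases hr : vbAltLoop tokens (true, 0, none) with
  | none => rfl
  | some st => rcases st with ⟨e, d, p⟩; rfl

-- ---- the parens-and-bang lemma: no such list of length ≥ 2 is accepted by B ----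

theorem vbPB_mem (u : List String) (h : vbPbang u = true) {t : String} (ht : t ∈ u) :
    t = "(" ∨ t = ")" ∨ t = "!" := by
  have := List.all_eq_true.mp h t ht
  simpa [or_assoc] using this

theorem vbPB_close (u : List String) (hpb : vbPbang u = true) (hna : vbNoAdjP u) :
    ∀ (e : Bool) (d : Nat) (p : Option String),
      (p = none ∨ p = some "(" ∨ p = some "!") → (p = none → d = 0) →
      (p = some "(" → u.head? ≠ some ")") →
      ")" ∈ u → vbAltLoop u (e, d, p) = none := by
  induction u with
  | nil => intro e d p _ _ _ hmem; simp at hmem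
  | cons t ts ih =>
    intro e d p hp hp0 hpo hmem
    have hpb' : vbPbang ts = true := by
      simp only [vbPbang, List.all_cons, Bool.and_eq_true] at hpb
      exact hpb.2
    have hna' : vbNoAdjP ts := fun j hj => hna (j + 1) (by simpa using hj)
    rcases vbPB_mem _ hpb (List.mem_cons_self ..) with h | h | h
    · subst h
      simp only [vbAltLoop, vbAltStep, if_pos rfl]
      cases e with
      | false => simp
      | true =>
        simp only [Bool.not_true, Bool.false_eq_true, if_false]
        have hmem' : ")" ∈ ts := by
          rcases List.mem_cons.mp hmem with h | h
          · exact absurd h.symm (by simp)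
          · exact h
        exact ih hpb' hna' true (d + 1) (some "(") (by simp) (by simp)
          (fun _ h0 => hna 0 (by simpa [List.head?_eq_getElem?] using h0)) hmem'
    · subst h
      simp only [vbAltLoop, vbAltStep]
      rw [if_neg (by simp), if_pos trivial]
      rcases hp with hq | hq | hq
      · simp [hp0 hq, hq, vbPrevOp]
      · exact absurd (by simp : ((")" : String) :: ts).head? = some ")") (hpo hq)
      · subst hq
        simp [vbPrevOp, vbOps]
    · subst h
      simp only [vbAltLoop, vbAltStep]
      rw [if_neg (by simp), if_neg (by simp), if_neg (by simp)]
      have hmem' : ")" ∈ ts := by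
        rcases List.mem_cons.mp hmem with h | h
        · exact absurd h.symm (by simp)
        · exact h
      exact ih hpb' hna' e d (some "!") (by simp) (by simp) (by simp) hmem'

theorem vbPB_noclose (u : List String) (hpb : vbPbang u = true) (hmem : ")" ∉ u) :
    ∀ (e : Bool) (d : Nat) (p : Option String),
      vbAltLoop u (e, d, p) = none ∨
        ∃ e' p', vbAltLoop u (e, d, p) = some (e', d + u.count "(", p') ∧
          (u = [] → p' = p) ∧ (u ≠ [] → p' = u.getLast?) := by
  induction u with
  | nil =>
    intro e d p
    right
    exact ⟨e, p, by simp [vbAltLoop], fun _ => rfl, fun h => absurd rfl h⟩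
  | cons t ts ih =>
    intro e d p
    have hpb' : vbPbang ts = true := by
      simp only [vbPbang, List.all_cons, Bool.and_eq_true] at hpb
      exact hpb.2
    have hmem' : ")" ∉ ts := fun h => hmem (List.mem_cons_of_mem _ h)
    have hlast : ∀ p', (ts = [] → p' = some t) → (ts ≠ [] → p' = ts.getLast?) →
        (t :: ts ≠ [] → p' = (t :: ts).getLast?) := by
      intro p' h1 h2 _
      cases ts with
      | nil => simpa using h1 rfl
      | cons b l => rw [List.getLast?_cons_cons]; exact h2 (by simp)
    rcases vbPB_mem _ hpb (List.mem_cons_self ..) with h | h | h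
    · subst h
      simp only [vbAltLoop, vbAltStep, if_pos rfl]
      cases e with
      | false => left; simp
      | true =>
        simp only [Bool.not_true, Bool.false_eq_true, if_false, if_pos trivial]
        have hred : (match some (true, d + 1, some "(") with
            | none => none
            | some st' => vbAltLoop ts st') = vbAltLoop ts (true, d + 1, some "(") := rfl
        try rw [hred]
        rcases ih hpb' hmem' true (d + 1) (some "(") with hr | ⟨e', p', hr, hn, hc⟩
        · left; exact hr
        · right
          refine ⟨e', p', ?_, by simp, hlast p' (fun h => by simpa using hn h) hc⟩
          rw [hr]
          congr 2
          simp [List.count_cons]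
          try omega
    · exact absurd (h ▸ List.mem_cons_self ..) hmem
    · subst h
      simp only [vbAltLoop, vbAltStep]
      rw [if_neg (by simp), if_neg (by simp), if_neg (by simp)]
      have hred : (match some (e, d, some "!") with
          | none => none
          | some st' => vbAltLoop ts st') = vbAltLoop ts (e, d, some "!") := rfl
      try rw [hred]
      rcases ih hpb' hmem' e d (some "!") with hr | ⟨e', p', hr, hn, hc⟩
      · left; exact hr
      · right
        refine ⟨e', p', ?_, by simp, hlast p' (fun h => by simpa using hn h) hc⟩
        rw [hr]
        congr 2
        try simp [List.count_cons]

theorem vbPB (u : List String) (hpb : vbPbang u = true) (hna : vbNoAdjP u)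
    (hlen : 2 ≤ u.length) : validate_bnf_alt u = false := by
  rw [vbAlt_else u (by omega)]
  rw [show vbSt0 = ((true : Bool), (0 : Nat), (none : Option String)) from rfl]
  by_cases hmem : ")" ∈ u
  · rw [vbPB_close u hpb hna true 0 none (Or.inl rfl) (fun _ => rfl) (by simp) hmem]
    rfl
  · rcases vbPB_noclose u hpb hmem true 0 none with hr | ⟨e', p', hr, _, hc⟩
    · rw [hr]
      rfl
    · rw [hr]
      have hu : u ≠ [] := by intro h; subst h; simp at hlen
      unfold vbFinish
      by_cases hcnt : u.count "(" = 0
      · have hnp : "(" ∉ u := List.count_eq_zero.mp hcnt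
        obtain ⟨x, hx⟩ := List.getLast?_isSome.mpr hu |> Option.isSome_iff_exists.mp
        have hxm : x ∈ u := List.mem_of_getLast? hx
        have hxb : x = "!" := by
          rcases vbPB_mem u hpb hxm with h | h | h
          · exact absurd (h ▸ hxm) hnp
          · exact absurd (h ▸ hxm) hmem
          · exact h
        rw [PySem.List.pyGet?_neg_one, hc hu, hx, hxb]
        simp [vbOps]
      · simp [hcnt]

-- ---- single-step computations of B's loop ----

theorem vbRun_snoc (u : List String) (t : String) (st : Bool × Nat × Option String) :
    vbAltLoop (u ++ [t]) st =
      match vbAltLoop u st with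
      | none => none
      | some st' => vbAltStep st' t := by
  rw [vbAltLoop_append]
  cases vbAltLoop u st with
  | none => rfl
  | some st' =>
    show vbAltLoop [t] st' = vbAltStep st' t
    simp only [vbAltLoop]
    cases vbAltStep st' t <;> rfl

theorem vbRun_snoc_some (u : List String) (t : String) (st st' : Bool × Nat × Option String)
    (h : vbAltLoop u st = some st') : vbAltLoop (u ++ [t]) st = vbAltStep st' t := by
  rw [vbRun_snoc, h]

theorem vbRun_snoc_none (u : List String) (t : String) (st : Bool × Nat × Option String)
    (h : vbAltLoop u st = none) : vbAltLoop (u ++ [t]) st = none := by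
  rw [vbRun_snoc, h]

theorem vbRd_snoc (u : List String) (t : String) (d : Nat) :
    vbRd (u ++ [t]) d =
      match vbRd u d with
      | none => none
      | some d' => vbRd [t] d' := by
  rw [vbRd_append]

theorem vbRd_one_open (d : Nat) : vbRd ["("] d = some (d + 1) := by simp [vbRd]

theorem vbRd_one_close (d : Nat) (h : d ≠ 0) : vbRd [")"] d = some (d - 1) := by
  simp [vbRd, h]

theorem vbRd_one_other (t : String) (d : Nat) (h1 : t ≠ "(") (h2 : t ≠ ")") :
    vbRd [t] d = some d := by
  simp [vbRd, h1, h2]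

theorem vbStep_open (e : Bool) (d : Nat) (p : Option String) :
    vbAltStep (e, d, p) "(" = if e then some (e, d + 1, some "(") else none := by
  cases e <;> simp [vbAltStep]

theorem vbStep_close (e : Bool) (d : Nat) (p : Option String) :
    vbAltStep (e, d, p) ")" =
      if d = 0 ∨ vbPrevOp p = true then none else some (e, d - 1, some ")") := by
  simp only [vbAltStep]
  rw [if_neg (by simp), if_pos trivial]
  by_cases h1 : d = 0
  · simp [h1]
  · by_cases h2 : vbPrevOp p <;> simp [h1, h2]

theorem vbStep_bang (e : Bool) (d : Nat) (p : Option String) :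
    vbAltStep (e, d, p) "!" = some (e, d, some "!") := by
  simp [vbAltStep]

theorem vbStep_other (e : Bool) (d : Nat) (p : Option String) (t : String)
    (h1 : t ≠ "(") (h2 : t ≠ ")") (h3 : t ≠ "!") :
    vbAltStep (e, d, p) t =
      if e == vbOps.contains t then none else some (!e, d, some t) := by
  simp [vbAltStep, h1, h2, h3]

-- ---- segment facts ----

theorem vbSeg_ne_nil (tokens : List String) (a b : Nat) (hab : a < b) (hb : b ≤ tokens.length) :
    vbSeg tokens a b ≠ [] := by
  have := vbSeg_length tokens a b (by omega) hb
  intro h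
  rw [h] at this
  simp at this
  omega

theorem vbAdj_step (tokens : List String) (hNA : vbNoAdjP tokens) (s i : Nat)
    (hs : tokens[s]? = some "(") (hsi : s < i) (hi : i < tokens.length)
    (ht : tokens[i] = ")") : s + 2 ≤ i := by
  by_contra h
  have hi1 : i = s + 1 := by omega
  exact hNA s ⟨hs, by rw [← hi1, List.getElem?_eq_getElem hi, ht]⟩

theorem vbSlice_eq (tokens : List String) (s i : Nat) :
    PySem.List.slice tokens (some ((s : Int) + 1)) (some (i : Int)) = vbSeg tokens (s + 1) i := by
  rw [show ((s : Int) + 1) = (((s + 1 : Nat)) : Int) by push_cast; ring, PySem.List.slice_natCast]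
  rfl

theorem vbSeg_getLast (tokens : List String) (a i : Nat) (hai : a < i) (hi : i ≤ tokens.length) :
    (vbSeg tokens a i).getLast? = some (tokens.getD (i - 1) "") := by
  have h1 : i - 1 < tokens.length := by omega
  have : vbSeg tokens a i = vbSeg tokens a (i - 1) ++ [tokens[i - 1]] := by
    rw [← vbSeg_snoc tokens a (i - 1) (by omega) h1]
    congr 1
    omega
  rw [this, List.getLast?_concat, List.getD_eq_getElem tokens "" h1]

-- ---- the stack invariant ----

theorem vbChain_lt (s : Nat) (rest : List Nat) (h : List.IsChain (· > ·) (s :: rest)) :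
    ∀ (k s' : Nat), rest[k]? = some s' → s' < s := by
  intro k s' hk
  have hp := List.isChain_iff_pairwise.mp h
  exact (List.pairwise_cons.mp hp).1 s' (List.mem_of_getElem? hk)

theorem vbStackOK_push (tokens : List String) (i : Nat) (stack : List Nat)
    (hi : i < tokens.length) (ht : tokens[i] = "(")
    (h : vbStackOK tokens i stack) : vbStackOK tokens (i + 1) (i :: stack) := by
  obtain ⟨h1, h2⟩ := h
  constructor
  · intro k s hk
    cases k with
    | zero =>
      simp only [List.getElem?_cons_zero, Option.some.injEq] at hk
      refine ⟨by omega, ?_, ?_⟩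
      · rw [← hk, List.getElem?_eq_getElem hi, ht]
      · rw [← hk, vbSeg_self]
        rfl
    | succ k =>
      simp only [List.getElem?_cons_succ] at hk
      obtain ⟨hs1, hs2, hs3⟩ := h1 k s hk
      refine ⟨by omega, hs2, ?_⟩
      rw [vbSeg_snoc tokens (s + 1) i (by omega) hi, vbRd_snoc, hs3, ht]
      exact vbRd_one_open k
  · rw [List.isChain_cons]
    refine ⟨?_, h2⟩
    intro b hb
    have hb' : stack[0]? = some b := by
      cases stack with
      | nil => simp at hb
      | cons s0 rest => simpa using hb
    exact (h1 0 b hb').1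

theorem vbStackOK_pop (tokens : List String) (i : Nat) (s1 : Nat) (rest : List Nat)
    (hi : i < tokens.length) (ht : tokens[i] = ")")
    (h : vbStackOK tokens i (s1 :: rest)) : vbStackOK tokens (i + 1) rest := by
  obtain ⟨h1, h2⟩ := h
  constructor
  · intro k s hk
    obtain ⟨hs1, hs2, hs3⟩ := h1 (k + 1) s (by simpa using hk)
    refine ⟨by omega, hs2, ?_⟩
    rw [vbSeg_snoc tokens (s + 1) i (by omega) hi, vbRd_snoc, hs3, ht]
    exact vbRd_one_close (k + 1) (by omega)
  · exact h2.tail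

theorem vbStackOK_keep (tokens : List String) (i : Nat) (stack : List Nat)
    (hi : i < tokens.length) (ht1 : tokens[i] ≠ "(") (ht2 : tokens[i] ≠ ")")
    (h : vbStackOK tokens i stack) : vbStackOK tokens (i + 1) stack := by
  obtain ⟨h1, h2⟩ := h
  refine ⟨?_, h2⟩
  intro k s hk
  obtain ⟨hs1, hs2, hs3⟩ := h1 k s hk
  refine ⟨by omega, hs2, ?_⟩
  rw [vbSeg_snoc tokens (s + 1) i (by omega) hi, vbRd_snoc, hs3]
  exact vbRd_one_other _ _ ht1 ht2

-- ---- evaluating B on a popped group ----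

theorem vbAlt_of_run (u : List String) (hu : u ≠ []) (e : Bool) (pv : String)
    (hrun : vbAltLoop u vbSt0 = some (e, 0, some pv)) (hlast : u.getLast? = some pv) :
    validate_bnf_alt u = !vbOps.contains pv := by
  by_cases hlen : u.length = 1
  · obtain ⟨x, hx⟩ := List.length_eq_one_iff.mp hlen
    subst hx
    simp only [List.getLast?_singleton, Option.some.injEq] at hlast
    rw [vbAlt_single, hlast]
  · rw [vbAlt_else u hlen, hrun]
    unfold vbFinish
    rw [PySem.List.pyGet?_neg_one, hlast]
    by_cases hc : vbOps.contains pv = true <;> simp [hc]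

theorem vbAlt_doomed (u : List String) (hna : vbNoAdjP u) (hu : u ≠ [])
    (hbal : vbRd u 0 = some 0)
    (hw : vbAltLoop u vbSt0 = none ∨
      (vbPbang u = true ∧ ∃ d p, vbAltLoop u vbSt0 = some (true, d, p))) :
    validate_bnf_alt u = false := by
  by_cases hlen : u.length = 1
  · obtain ⟨x, hx⟩ := List.length_eq_one_iff.mp hlen
    subst hx
    have hx1 : x ≠ "(" := by
      rintro rfl
      rw [vbRd_one_open] at hbal
      simp at hbal
    have hx2 : x ≠ ")" := by
      rintro rfl
      simp [vbRd] at hbal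
    rcases hw with hw | ⟨hpb, d, p, hw⟩
    · by_cases hx3 : x = "!"
      · subst hx3
        simp [vbAltLoop, vbStep_bang, vbSt0] at hw
      · have hstep := vbStep_other true 0 none x hx1 hx2 hx3
        rw [show vbSt0 = ((true : Bool), (0 : Nat), (none : Option String)) from rfl] at hw
        simp only [vbAltLoop, hstep] at hw
        by_cases hc : vbOps.contains x = true
        · rw [vbAlt_single, hc]; rfl
        · have hc' : x ∉ vbOps := by simpa using hc
          simp [hc'] at hw
    · have hx3 : x = "!" := by
        rcases vbPB_mem _ hpb (List.mem_cons_self ..) with h | h | h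
        · exact absurd h hx1
        · exact absurd h hx2
        · exact h
      subst hx3
      rw [vbAlt_single]
      simp [vbOps]
  · have hlen2 : 2 ≤ u.length := by
      have : u.length ≠ 0 := fun h => hu (List.length_eq_zero_iff.mp h)
      omega
    rcases hw with hw | ⟨hpb, _, _, _⟩
    · rw [vbAlt_else u hlen, hw]
      rfl
    · exact vbPB u hpb hna hlen2

-- ---- the terminal case of A's loop ----

theorem vbLoop_terminal_false (tokens : List String) (i : Nat) (e : Bool) (stack : List Nat)
    (hi : ¬ i < tokens.length) (hs : stack ≠ []) : vbLoop tokens i e stack = false := by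
  rw [vbLoop.eq_def, dif_neg hi]
  have hlen : stack.length ≠ 0 := by simpa using hs
  by_cases hc : vbOps.contains ((PySem.List.pyGet? tokens (-1)).getD "") = true
  · rw [if_pos hc]
  · rw [if_neg hc, if_pos (by simpa using hlen)]

theorem vbPbang_snoc (u : List String) (t : String) (hu : vbPbang u = true)
    (ht : t = "(" ∨ t = ")" ∨ t = "!") : vbPbang (u ++ [t]) = true := by
  simp only [vbPbang, List.all_append, List.all_cons, List.all_nil, Bool.and_true,
    Bool.and_eq_true]
  refine ⟨by simpa [vbPbang] using hu, ?_⟩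
  rcases ht with h | h | h <;> simp [h]

-- ---- the doomed-scan lemma: once some open group can no longer validate, A returns False ----

theorem vbDoom (tokens : List String)
    (hIH : ∀ u : List String, u.length < tokens.length → vbNoAdjP u → u ≠ [] →
      validate_bnf u = validate_bnf_alt u)
    (hNA : vbNoAdjP tokens) :
    ∀ (n i : Nat) (e : Bool) (stack : List Nat),
      tokens.length - i ≤ n → i ≤ tokens.length →
      vbStackOK tokens i stack →
      (∃ (k s : Nat), stack[k]? = some s ∧ vbWitness tokens i e s) →
      vbLoop tokens i e stack = false := by
  intro n
  induction n with
  | zero =>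
    intro i e stack hn hle hSO hW
    obtain ⟨k, s, hks, _⟩ := hW
    exact vbLoop_terminal_false tokens i e stack (by omega)
      (fun h => by subst h; simp at hks)
  | succ n ih =>
    intro i e stack hn hle hSO hW
    by_cases hi : i < tokens.length
    swap
    · obtain ⟨k, s, hks, _⟩ := hW
      exact vbLoop_terminal_false tokens i e stack hi (fun h => by subst h; simp at hks)
    obtain ⟨k, s, hks, hw⟩ := hW
    have hslt : s < i := (hSO.1 k s hks).1
    have hseg : vbSeg tokens (s + 1) (i + 1) = vbSeg tokens (s + 1) i ++ [tokens[i]] :=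
      vbSeg_snoc tokens (s + 1) i (by omega) hi
    rw [vbLoop.eq_def, dif_pos hi]
    by_cases ht1 : tokens[i] = "("
    · rw [if_pos ht1]
      apply ih (i + 1) e (i :: stack) (by omega) (by omega)
        (vbStackOK_push tokens i stack hi ht1 hSO)
      refine ⟨k + 1, s, by simpa using hks, ?_⟩
      rcases hw with hw | ⟨he, hpb, d, p, hrun⟩
      · left
        rw [hseg, vbRun_snoc_none _ _ _ hw]
      · right
        rw [hseg]
        refine ⟨he, vbPbang_snoc _ _ hpb (by rw [ht1]; tauto), d + 1, some "(", ?_⟩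
        rw [vbRun_snoc_some _ _ _ _ hrun, ht1, vbStep_open]
        try rfl
    · rw [if_neg ht1]
      by_cases ht2 : tokens[i] = ")"
      · rw [if_pos ht2]
        cases stack with
        | nil => rfl
        | cons s1 rest =>
          obtain ⟨hs1lt, hs1tok, hs1rd⟩ := hSO.1 0 s1 rfl
          have hadj : s1 + 2 ≤ i := vbAdj_step tokens hNA s1 i hs1tok hs1lt hi ht2
          have hsegne : vbSeg tokens (s1 + 1) i ≠ [] :=
            vbSeg_ne_nil tokens (s1 + 1) i (by omega) (by omega)
          have hseglen : (vbSeg tokens (s1 + 1) i).length < tokens.length := by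
            have := vbSeg_length_le tokens (s1 + 1) i
            omega
          have hsegna : vbNoAdjP (vbSeg tokens (s1 + 1) i) := vbNoAdjP_seg tokens _ _ hNA
          have hval : validate_bnf (PySem.List.slice tokens (some ((s1 : Int) + 1)) (some (i : Int)))
              = validate_bnf_alt (vbSeg tokens (s1 + 1) i) := by
            rw [vbSlice_eq tokens s1 i]
            exact hIH _ hseglen hsegna hsegne
          show (if validate_bnf (PySem.List.slice tokens (some ((s1 : Int) + 1)) (some (i : Int))) then
              vbLoop tokens (i + 1) e rest else false) = false
          cases k with
          | zero =>
            have hseq : s1 = s := by simpa using hks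
            subst hseq
            have hbf : validate_bnf_alt (vbSeg tokens (s1 + 1) i) = false := by
              apply vbAlt_doomed _ hsegna hsegne hs1rd
              rcases hw with hw | ⟨he, hpb, d, p, hrun⟩
              · exact Or.inl hw
              · exact Or.inr ⟨hpb, d, p, hrun⟩
            rw [hval, hbf]
            rfl
          | succ k =>
            cases hvb : validate_bnf_alt (vbSeg tokens (s1 + 1) i) with
            | false =>
              rw [hval, hvb]
              rfl
            | true =>
              rw [hval, hvb, if_pos rfl]
              apply ih (i + 1) e rest (by omega) (by omega)
                (vbStackOK_pop tokens i s1 rest hi ht2 hSO)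
              refine ⟨k, s, by simpa using hks, ?_⟩
              rcases hw with hw | ⟨he, hpb, d, p, hrun⟩
              · left
                rw [hseg, vbRun_snoc_none _ _ _ hw]
              · by_cases hcond : (d = 0 ∨ vbPrevOp p = true)
                · left
                  rw [hseg, vbRun_snoc_some _ _ _ _ hrun, ht2, vbStep_close, if_pos hcond]
                · right
                  rw [hseg]
                  refine ⟨he, vbPbang_snoc _ _ hpb (by rw [ht2]; tauto), d - 1, some ")", ?_⟩
                  rw [vbRun_snoc_some _ _ _ _ hrun, ht2, vbStep_close, if_neg hcond]
                  try rfl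
      · rw [if_neg ht2]
        by_cases ht3 : tokens[i] = "!"
        · rw [if_pos ht3]
          apply ih (i + 1) e stack (by omega) (by omega)
            (vbStackOK_keep tokens i stack hi ht1 ht2 hSO)
          refine ⟨k, s, hks, ?_⟩
          rcases hw with hw | ⟨he, hpb, d, p, hrun⟩
          · left
            rw [hseg, vbRun_snoc_none _ _ _ hw]
          · right
            rw [hseg]
            refine ⟨he, vbPbang_snoc _ _ hpb (by rw [ht3]; tauto), d, some "!", ?_⟩
            rw [vbRun_snoc_some _ _ _ _ hrun, ht3, vbStep_bang]
            try rfl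
        · rw [if_neg ht3]
          by_cases hc : ((e && vbOps.contains tokens[i]) || (!e && !(vbOps.contains tokens[i]))) = true
          · rw [if_pos hc]
          · rw [if_neg hc]
            apply ih (i + 1) (!e) stack (by omega) (by omega)
              (vbStackOK_keep tokens i stack hi ht1 ht2 hSO)
            refine ⟨k, s, hks, ?_⟩
            rcases hw with hw | ⟨he, hpb, d, p, hrun⟩
            · left
              rw [hseg, vbRun_snoc_none _ _ _ hw]
            · left
              have hcont : vbOps.contains tokens[i] = true := by
                subst he
                simpa using hc
              rw [hseg, vbRun_snoc_some _ _ _ _ hrun,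
                vbStep_other true d p tokens[i] ht1 ht2 ht3, if_pos (by rw [hcont]; rfl)]

theorem vbAltLoop_cons (t : String) (ts : List String) (st : Bool × Nat × Option String) :
    vbAltLoop (t :: ts) st =
      match vbAltStep st t with
      | none => none
      | some st' => vbAltLoop ts st' := rfl

theorem vbPrevSeg_self (tokens : List String) (a : Nat) : vbPrevSeg tokens a a = none := by
  unfold vbPrevSeg
  rw [if_pos le_rfl]

theorem vbPrevSeg_succ (tokens : List String) (a i : Nat) (h : a ≤ i) :
    vbPrevSeg tokens a (i + 1) = some (tokens.getD i "") := by
  unfold vbPrevSeg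
  rw [if_neg (by omega)]
  simp

theorem vbPrevSeg_lt (tokens : List String) (a i : Nat) (h : a < i) :
    vbPrevSeg tokens a i = some (tokens.getD (i - 1) "") := by
  unfold vbPrevSeg
  rw [if_neg (by omega)]

theorem vbAltCond (e o : Bool) : ((e && o) || (!e && !o)) = (e == o) := by
  cases e <;> cases o <;> rfl

theorem vbLive_terminal (tokens : List String) (e : Bool) (stack : List Nat) :
    vbLoop tokens tokens.length e stack =
      vbFinish tokens (vbAltLoop (tokens.drop tokens.length)
        (e, stack.length, vbPrevSeg tokens 0 tokens.length)) := by
  rw [vbLoop.eq_def, dif_neg (by omega), List.drop_length]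
  by_cases hc : vbOps.contains ((PySem.List.pyGet? tokens (-1)).getD "") = true
  · simp [vbFinish, vbAltLoop, hc]
  · by_cases hs : stack.length = 0 <;> simp [vbFinish, vbAltLoop, hc, hs]

-- ---- the live-scan lemma: while every open group still validates, A's scan mirrors B's ----

theorem vbLive (tokens : List String)
    (hIH : ∀ u : List String, u.length < tokens.length → vbNoAdjP u → u ≠ [] →
      validate_bnf u = validate_bnf_alt u)
    (hNA : vbNoAdjP tokens) :
    ∀ (n i : Nat) (e : Bool) (stack : List Nat),
      tokens.length - i ≤ n → i ≤ tokens.length →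
      vbStackOK tokens i stack →
      vbLiveOK tokens i e stack →
      vbLoop tokens i e stack =
        vbFinish tokens (vbAltLoop (tokens.drop i) (e, stack.length, vbPrevSeg tokens 0 i)) := by
  intro n
  induction n with
  | zero =>
    intro i e stack hn hle hSO hLive
    have hieq : i = tokens.length := by omega
    subst hieq
    exact vbLive_terminal tokens e stack
  | succ n ih =>
    intro i e stack hn hle hSO hLive
    by_cases hi : i < tokens.length
    swap
    · have hieq : i = tokens.length := by omega
      subst hieq
      exact vbLive_terminal tokens e stack
    have hdrop : tokens.drop i = tokens[i] :: tokens.drop (i + 1) := List.drop_eq_getElem_cons hi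
    have hgd : tokens.getD i "" = tokens[i] := List.getD_eq_getElem tokens "" hi
    rw [vbLoop.eq_def, dif_pos hi, hdrop, vbAltLoop_cons]
    by_cases ht1 : tokens[i] = "("
    · rw [if_pos ht1, ht1, vbStep_open]
      cases e with
      | false =>
        rw [show (if (false : Bool) then some (false, stack.length + 1, some "(") else none)
            = (none : Option (Bool × Nat × Option String)) from rfl]
        show vbLoop tokens (i + 1) false (i :: stack) = false
        apply vbDoom tokens hIH hNA tokens.length (i + 1) false (i :: stack) (by omega) (by omega)
          (vbStackOK_push tokens i stack hi ht1 hSO)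
        refine ⟨0, i, rfl, Or.inr ⟨rfl, by rw [vbSeg_self]; rfl, 0, none, by rw [vbSeg_self]; rfl⟩⟩
      | true =>
        rw [show (if (true : Bool) then some (true, stack.length + 1, some "(") else none)
            = some ((true : Bool), stack.length + 1, some "(") from rfl]
        have hp : vbPrevSeg tokens 0 (i + 1) = some "(" := by
          rw [vbPrevSeg_succ tokens 0 i (by omega), hgd, ht1]
        have hLive' : vbLiveOK tokens (i + 1) true (i :: stack) := by
          intro k s hk
          cases k with
          | zero =>
            simp only [List.getElem?_cons_zero, Option.some.injEq] at hk
            rw [← hk, vbSeg_self, vbPrevSeg_self]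
            rfl
          | succ k =>
            simp only [List.getElem?_cons_succ] at hk
            have hslt : s < i := (hSO.1 k s hk).1
            rw [vbSeg_snoc tokens (s + 1) i (by omega) hi,
              vbRun_snoc_some _ _ _ _ (hLive k s hk), ht1, vbStep_open,
              vbPrevSeg_succ tokens (s + 1) i (by omega), hgd, ht1]
            rfl
        rw [ih (i + 1) true (i :: stack) (by omega) (by omega)
          (vbStackOK_push tokens i stack hi ht1 hSO) hLive', hp]
        rfl
    · rw [if_neg ht1]
      by_cases ht2 : tokens[i] = ")"
      · rw [if_pos ht2, ht2, vbStep_close]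
        cases stack with
        | nil =>
          rw [if_pos (Or.inl (by simp))]
          rfl
        | cons s1 rest =>
          obtain ⟨hs1lt, hs1tok, hs1rd⟩ := hSO.1 0 s1 rfl
          have hadj : s1 + 2 ≤ i := vbAdj_step tokens hNA s1 i hs1tok hs1lt hi ht2
          have hsegne : vbSeg tokens (s1 + 1) i ≠ [] :=
            vbSeg_ne_nil tokens (s1 + 1) i (by omega) (by omega)
          have hseglen : (vbSeg tokens (s1 + 1) i).length < tokens.length := by
            have := vbSeg_length_le tokens (s1 + 1) i
            omega
          have hsegna : vbNoAdjP (vbSeg tokens (s1 + 1) i) := vbNoAdjP_seg tokens _ _ hNA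
          have hval : validate_bnf (PySem.List.slice tokens (some ((s1 : Int) + 1)) (some (i : Int)))
              = validate_bnf_alt (vbSeg tokens (s1 + 1) i) := by
            rw [vbSlice_eq tokens s1 i]
            exact hIH _ hseglen hsegna hsegne
          have hrun1 := hLive 0 s1 rfl
          rw [vbPrevSeg_lt tokens (s1 + 1) i (by omega)] at hrun1
          have hlast : (vbSeg tokens (s1 + 1) i).getLast? = some (tokens.getD (i - 1) "") :=
            vbSeg_getLast tokens (s1 + 1) i (by omega) (by omega)
          have hBslice : validate_bnf_alt (vbSeg tokens (s1 + 1) i)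
              = !vbOps.contains (tokens.getD (i - 1) "") :=
            vbAlt_of_run _ hsegne e _ hrun1 hlast
          have hpseg0 : vbPrevSeg tokens 0 i = some (tokens.getD (i - 1) "") :=
            vbPrevSeg_lt tokens 0 i (by omega)
          show (if validate_bnf (PySem.List.slice tokens (some ((s1 : Int) + 1)) (some (i : Int))) then
              vbLoop tokens (i + 1) e rest else false) = _
          by_cases hcp : vbOps.contains (tokens.getD (i - 1) "") = true
          · rw [if_neg (by rw [hval, hBslice, hcp]; simp),
              if_pos (Or.inr (by rw [hpseg0]; simp only [vbPrevOp]; exact hcp))]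
            rfl
          · rw [if_pos (by
                rw [hval, hBslice,
                  (by simpa using hcp : vbOps.contains (tokens.getD (i - 1) "") = false)]
                rfl),
              if_neg (by push_neg; exact ⟨by simp, by rw [hpseg0]; simp only [vbPrevOp]; exact hcp⟩)]
            have hp : vbPrevSeg tokens 0 (i + 1) = some ")" := by
              rw [vbPrevSeg_succ tokens 0 i (by omega), hgd, ht2]
            have hLive' : vbLiveOK tokens (i + 1) e rest := by
              intro k s hk
              have hslt : s < i := (hSO.1 (k + 1) s (by simpa using hk)).1
              have hss1 : s < s1 := vbChain_lt s1 rest hSO.2 k s hk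
              have hlv := hLive (k + 1) s (by simpa using hk)
              rw [vbSeg_snoc tokens (s + 1) i (by omega) hi,
                vbRun_snoc_some _ _ _ _ hlv, ht2, vbStep_close,
                if_neg (by
                  push_neg
                  refine ⟨by omega, ?_⟩
                  rw [vbPrevSeg_lt tokens (s + 1) i (by omega)]
                  simp only [vbPrevOp]
                  exact hcp),
                vbPrevSeg_succ tokens (s + 1) i (by omega), hgd, ht2]
              rfl
            rw [ih (i + 1) e rest (by omega) (by omega)
              (vbStackOK_pop tokens i s1 rest hi ht2 hSO) hLive', hp]
            rfl
      · rw [if_neg ht2]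
        by_cases ht3 : tokens[i] = "!"
        · rw [if_pos ht3, ht3, vbStep_bang]
          have hp : vbPrevSeg tokens 0 (i + 1) = some "!" := by
            rw [vbPrevSeg_succ tokens 0 i (by omega), hgd, ht3]
          have hLive' : vbLiveOK tokens (i + 1) e stack := by
            intro k s hk
            have hslt : s < i := (hSO.1 k s hk).1
            rw [vbSeg_snoc tokens (s + 1) i (by omega) hi,
              vbRun_snoc_some _ _ _ _ (hLive k s hk), ht3, vbStep_bang,
              vbPrevSeg_succ tokens (s + 1) i (by omega), hgd, ht3]
          rw [ih (i + 1) e stack (by omega) (by omega)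
            (vbStackOK_keep tokens i stack hi ht1 ht2 hSO) hLive', hp]
        · rw [if_neg ht3, vbStep_other e stack.length (vbPrevSeg tokens 0 i) tokens[i] ht1 ht2 ht3]
          by_cases hc : ((e && vbOps.contains tokens[i]) || (!e && !(vbOps.contains tokens[i]))) = true
          · rw [if_pos hc, if_pos (by rw [← vbAltCond]; exact hc)]
            rfl
          · rw [if_neg hc, if_neg (by rw [← vbAltCond]; exact hc)]
            have hp : vbPrevSeg tokens 0 (i + 1) = some tokens[i] := by
              rw [vbPrevSeg_succ tokens 0 i (by omega), hgd]
            have hLive' : vbLiveOK tokens (i + 1) (!e) stack := by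
              intro k s hk
              have hslt : s < i := (hSO.1 k s hk).1
              rw [vbSeg_snoc tokens (s + 1) i (by omega) hi,
                vbRun_snoc_some _ _ _ _ (hLive k s hk),
                vbStep_other e k (vbPrevSeg tokens (s + 1) i) tokens[i] ht1 ht2 ht3,
                if_neg (by rw [← vbAltCond]; exact hc),
                vbPrevSeg_succ tokens (s + 1) i (by omega), hgd]
            rw [ih (i + 1) (!e) stack (by omega) (by omega)
              (vbStackOK_keep tokens i stack hi ht1 ht2 hSO) hLive', hp]

theorem vbMain : ∀ (N : Nat) (tokens : List String), tokens.length ≤ N →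
    vbNoAdjP tokens → tokens ≠ [] → validate_bnf tokens = validate_bnf_alt tokens := by
  intro N
  induction N with
  | zero =>
    intro tokens hN _ hne
    exact absurd (List.length_eq_zero_iff.mp (by omega)) hne
  | succ N ihN =>
    intro tokens hN hNA hne
    have hIH : ∀ u : List String, u.length < tokens.length → vbNoAdjP u → u ≠ [] →
        validate_bnf u = validate_bnf_alt u := by
      intro u hu hna hune
      exact ihN u (by omega) hna hune
    by_cases hlen : tokens.length = 1
    · obtain ⟨x, hx⟩ := List.length_eq_one_iff.mp hlen
      subst hx
      rw [vbA_single, vbAlt_single]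
    · have hguard : ¬((tokens.length == 1 && !(vbOps.contains (tokens.headD ""))) = true) := by
        simp [hlen]
      rw [validate_bnf, if_neg hguard, vbAlt_else tokens hlen]
      have := vbLive tokens hIH hNA tokens.length 0 true [] (by omega) (by omega)
        ⟨fun k s hk => by simp at hk, by simp⟩
        (fun k s hk => by simp at hk)
      rw [this, List.drop_zero]
      rfl

-- ===== VERDICT =====
theorem validate_bnf_spec : Claim_equal_validate_bnf := by
  intro tokens _ hPre
  unfold Spec_validate_bnf
  exact vbMain tokens.length tokens le_rfl ((vbNoAdj_iff tokens).mp hPre.2) hPre.1
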